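-- pv_equiv track=rewrite | github.com/danielgonzagat/act | atos_core/intent_grammar_v91.py | normalize_user_text_v91
-- ===== SOURCE A (Python) =====
-- import unicodedata
--
-- def _strip_accents(text: str) -> str:
--     # Deterministic accent-folding (stdlib only).
--     s = unicodedata.normalize("NFD", str(text))
--     return "".join(ch for ch in s if unicodedata.category(ch) != "Mn")
--
-- def normalize_user_text_v91(text: str) -> str:
--     """
--     Deterministic normalization for intent parsing:
--       - lowercase
--       - accent fold
--       - keep '=' and '+' as explicit tokens (surrounded by spaces)
--       - remove simple punctuation by turning it into whitespace
--     """
--     s = _strip_accents(str(text or "")).lower()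
--     s = s.replace("=", " = ")
--     s = s.replace("+", " + ")
--     for ch in [".", ",", ";", ":", "!", "?", "(", ")", "[", "]", "{", "}", "\"", "'"]:
--         s = s.replace(ch, " ")
--     s = " ".join(x for x in s.split(" ") if x)
--     return s.strip()
-- ===== SOURCE B (Python) =====
-- import unicodedata
--
-- def _strip_accents(text: str) -> str:
--     s = unicodedata.normalize("NFD", str(text))
--     return "".join(ch for ch in s if unicodedata.category(ch) != "Mn")
--
-- _PUNCT = {".", ",", ";", ":", "!", "?", "(", ")", "[", "]", "{", "}", "\"", "'"}
--
-- def normalize_user_text_v91(text: str) -> str: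
--     # One pass: build the token list directly instead of replace-chains + split.
--     s = _strip_accents(str(text or "")).lower()
--     tokens = []
--     cur = []
--     for ch in s:
--         if ch == ' ':
--             if cur:
--                 tokens.append(''.join(cur))
--                 cur = []
--         elif ch == '=' or ch == '+':
--             if cur:
--                 tokens.append(''.join(cur))
--                 cur = []
--             tokens.append(ch)
--         elif ch in _PUNCT:
--             if cur:
--                 tokens.append(''.join(cur))
--                 cur = []
--         else:
--             cur.append(ch)
--     if cur:
--         tokens.append(''.join(cur))
--     return ' '.join(tokens).strip()
-- ===== Notes on version B (the rewrite author's own statement) =====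
-- stated objective: alternative
-- what changed: Replaced the 16 sequential str.replace passes plus split/filter/join with a single character-by-character pass that builds the token list directly with a current-word accumulator.
import Mathlib
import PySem

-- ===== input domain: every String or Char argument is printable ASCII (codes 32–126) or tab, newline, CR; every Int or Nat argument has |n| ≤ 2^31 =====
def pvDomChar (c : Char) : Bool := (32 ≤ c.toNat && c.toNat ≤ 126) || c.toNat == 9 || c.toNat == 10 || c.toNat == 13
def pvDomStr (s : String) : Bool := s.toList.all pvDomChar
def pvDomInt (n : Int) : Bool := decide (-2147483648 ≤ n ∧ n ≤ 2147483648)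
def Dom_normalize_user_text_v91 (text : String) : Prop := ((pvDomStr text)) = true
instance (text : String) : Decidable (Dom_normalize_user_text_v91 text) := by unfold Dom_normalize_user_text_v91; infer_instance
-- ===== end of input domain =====

-- B replaces A's chain of 16 str.replace passes plus split/filter/join by a single
-- character-by-character pass that builds the token list directly; equal return values proved below.


-- ===== PORT A =====
-- _strip_accents: NFD-normalize then drop category-Mn chars. Hand-ported as the identity,
-- exact on the stated domain: ASCII (and tab/newline/CR) is NFD-invariant and contains no Mn
-- characters. Likewise `str(text or "")` is `text` itself for a str argument (`"" or ""` is `""`).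
def pv_strip_accents (text : String) : String := text

def pvPunctStrs : List String := [".", ",", ";", ":", "!", "?", "(", ")", "[", "]", "{", "}", "\"", "'"]

def normalize_user_text_v91 (text : String) : String :=
  let s0 := PySem.Str.lower (pv_strip_accents text)
  let s1 := PySem.Str.replace s0 "=" " = "
  let s2 := PySem.Str.replace s1 "+" " + "
  let s3 := pvPunctStrs.foldl (fun s ch => PySem.Str.replace s ch " ") s2
  -- s.split(" "): sep ≠ "", so split? is `some`; getD [] is never taken
  let parts := (PySem.Str.split? s3 " ").getD []
  let s4 := PySem.Str.join " " (parts.filter (fun x => x ≠ ""))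
  PySem.Str.strip s4

-- ===== PORT B =====
def pvPunct : List Char := ['.', ',', ';', ':', '!', '?', '(', ')', '[', ']', '{', '}', '"', '\'']

-- tokens.append(''.join(cur)) if cur else nothing
def pvFlush (toks : List (List Char)) (cur : List Char) : List (List Char) :=
  if cur = [] then toks else toks ++ [cur.reverse]

-- the for-loop of B: state = (tokens, cur); cur kept reversed
def pvTokens : List Char → List (List Char) → List Char → List (List Char)
  | [], toks, cur => pvFlush toks cur
  | c :: rest, toks, cur =>
    if c = ' ' then pvTokens rest (pvFlush toks cur) []
    else if c = '=' ∨ c = '+' then pvTokens rest (pvFlush toks cur ++ [[c]]) []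
    else if c ∈ pvPunct then pvTokens rest (pvFlush toks cur) []
    else pvTokens rest toks (c :: cur)

def normalize_user_text_v91_alt (text : String) : String :=
  let cs := (PySem.Str.lower (pv_strip_accents text)).toList
  String.ofList (PySem.Chars.strip (PySem.Chars.join [' '] (pvTokens cs [] [])))

-- ===== PRECONDITION & SPEC =====
def Spec_normalize_user_text_v91 (text : String) (out : String) : Prop := out = normalize_user_text_v91_alt text
instance (text : String) (out : String) : Decidable (Spec_normalize_user_text_v91 text out) := by unfold Spec_normalize_user_text_v91; infer_instance

-- ===== CLAIM (what is proved, stated in full; the proofs are below) =====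
def Claim_equal_normalize_user_text_v91 : Prop := ∀ (text : String), Dom_normalize_user_text_v91 text → Spec_normalize_user_text_v91 text (normalize_user_text_v91 text)

-- ===== LEMMAS AND PROOFS =====

-- the per-character expansion A's replace chain performs
def pvExpand (c : Char) : List Char :=
  if c = '=' then [' ', '=', ' ']
  else if c = '+' then [' ', '+', ' ']
  else if c ∈ pvPunct then [' ']
  else [c]

-- replace with a single-character pattern is a flatMap
theorem pv_replace_go_single (c : Char) (new : List Char) :
    ∀ (fuel : Nat) (l acc : List Char), l.length ≤ fuel →
      PySem.Chars.replace.go [c] new fuel l acc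
        = acc.reverse ++ l.flatMap (fun x => if x = c then new else [x]) := by
  intro fuel
  induction fuel with
  | zero =>
    intro l acc h
    have : l = [] := List.length_eq_zero_iff.mp (Nat.le_zero.mp h)
    subst this
    simp [PySem.Chars.replace.go]
  | succ n ih =>
    intro l acc h
    cases l with
    | nil => simp [PySem.Chars.replace.go]
    | cons x t =>
      by_cases hx : x = c
      · subst hx
        have hpre : [x].isPrefixOf (x :: t) = true := by simp [List.isPrefixOf]
        simp only [PySem.Chars.replace.go, hpre, if_pos]
        rw [ih _ _ (by simpa using Nat.le_of_succ_le_succ h)]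
        simp
      · have hpre : [c].isPrefixOf (x :: t) = false := by
          simp [List.isPrefixOf]; exact fun hh => hx hh.symm
        simp only [PySem.Chars.replace.go, hpre, Bool.false_eq_true, ite_false]
        rw [ih _ _ (by simpa using Nat.le_of_succ_le_succ h)]
        simp [hx]

theorem pv_replace_single (c : Char) (new l : List Char) :
    PySem.Chars.replace l [c] new = l.flatMap (fun x => if x = c then new else [x]) := by
  simp [PySem.Chars.replace, pv_replace_go_single c new l.length l [] le_rfl]

-- split on a single character, structurally
def pvConsFirst (x : Char) : List (List Char) → List (List Char)
  | [] => [[x]]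
  | h :: t => (x :: h) :: t

def pvSplitC (c : Char) : List Char → List (List Char)
  | [] => [[]]
  | x :: t => if x = c then [] :: pvSplitC c t else pvConsFirst x (pvSplitC c t)

theorem pv_splitC_ne_nil (c : Char) (l : List Char) : pvSplitC c l ≠ [] := by
  cases l with
  | nil => simp [pvSplitC]
  | cons x t =>
    simp only [pvSplitC]
    split
    · simp
    · cases pvSplitC c t <;> simp [pvConsFirst]

theorem pv_splitOn_go_single (c : Char) :
    ∀ (fuel : Nat) (l cur : List Char) (acc : List (List Char)), l.length < fuel →
      PySem.Chars.splitOn.go [c] fuel l cur acc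
        = acc.reverse ++ (pvSplitC c l).modifyHead (fun h => cur.reverse ++ h) := by
  intro fuel
  induction fuel with
  | zero => intro l cur acc h; omega
  | succ n ih =>
    intro l cur acc h
    cases l with
    | nil => simp [PySem.Chars.splitOn.go, pvSplitC]
    | cons x t =>
      by_cases hx : x = c
      · subst hx
        have hpre : [x].isPrefixOf (x :: t) = true := by simp [List.isPrefixOf]
        simp only [PySem.Chars.splitOn.go, hpre, if_pos]
        rw [ih _ _ _ (by simpa using Nat.lt_of_succ_lt_succ h)]
        cases htt : pvSplitC x t <;> simp [pvSplitC, htt, List.modifyHead]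
      · have hpre : [c].isPrefixOf (x :: t) = false := by
          simp [List.isPrefixOf]; exact fun hh => hx hh.symm
        simp only [PySem.Chars.splitOn.go, hpre, Bool.false_eq_true, ite_false]
        rw [ih _ _ _ (by simpa using Nat.lt_of_succ_lt_succ h)]
        simp only [pvSplitC, hx, ite_false]
        rcases hne : pvSplitC c t with _ | ⟨hd, tl⟩
        · exact absurd hne (pv_splitC_ne_nil c t)
        · simp [pvConsFirst]
  
theorem pv_splitOn_single (c : Char) (l : List Char) :
    PySem.Chars.splitOn l [c] = pvSplitC c l := by
  rw [PySem.Chars.splitOn, pv_splitOn_go_single c (l.length + 1) l [] [] (by omega)]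
  rcases hne : pvSplitC c l with _ | ⟨hd, tl⟩
  · exact absurd hne (pv_splitC_ne_nil c l)
  · simp

theorem pv_splitC_not_mem {c : Char} {w : List Char} (h : c ∉ w) : pvSplitC c w = [w] := by
  induction w with
  | nil => rfl
  | cons x t ih =>
    have hx : ¬ x = c := fun hh => h (by simp [hh])
    have ht : c ∉ t := fun hh => h (by simp [hh])
    simp [pvSplitC, hx, ih ht, pvConsFirst]

theorem pv_splitC_append {c : Char} {w : List Char} (t : List Char) (h : c ∉ w) :
    pvSplitC c (w ++ c :: t) = w :: pvSplitC c t := by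
  induction w with
  | nil => simp [pvSplitC]
  | cons x ww ih =>
    have hx : ¬ x = c := fun hh => h (by simp [hh])
    have hw : c ∉ ww := fun hh => h (by simp [hh])
    simp only [List.cons_append, pvSplitC, hx, ite_false, ih hw, pvConsFirst]

-- the punctuation loop is a flatMap (provided ' ' is not itself replaced)
theorem pv_foldl_replace_chars (ps : List Char) (h : ' ' ∉ ps) (l : List Char) :
    ps.foldl (fun s ch => PySem.Chars.replace s [ch] [' ']) l
      = l.flatMap (fun x => if x ∈ ps then [' '] else [x]) := by
  induction ps generalizing l with
  | nil => simp
  | cons p ps ih =>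
    have hps : ' ' ∉ ps := fun hh => h (by simp [hh])
    have hp : ¬ (' ' = p) := fun hh => h (by simp [← hh])
    rw [List.foldl_cons, pv_replace_single, ih hps, List.flatMap_assoc]
    refine List.flatMap_congr (fun x _ => ?_)
    by_cases hx : x = p
    · subst hx; simp [hps]
    · simp only [List.mem_cons, hx, false_or]
      by_cases hx2 : x ∈ ps <;> simp [hx2]

-- A's whole replace chain, character-wise
theorem pv_strfoldl_to_chars (ps : List String) (s : String) :
    (ps.foldl (fun t ch => PySem.Str.replace t ch " ") s).toList
      = (ps.map String.toList).foldl (fun l ch => PySem.Chars.replace l ch [' ']) s.toList := by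
  induction ps generalizing s with
  | nil => rfl
  | cons p ps ih =>
    rw [List.foldl_cons, ih, List.map_cons, List.foldl_cons, PySem.Str.toList_replace]
    rfl

theorem pv_expand_pointwise (x : Char) :
    (if x = '=' then (' ' :: '=' :: ' ' :: []) else [x]).flatMap
        (fun y => (if y = '+' then (' ' :: '+' :: ' ' :: []) else [y]).flatMap
          (fun z => if z ∈ pvPunct then [' '] else [z])) = pvExpand x := by
  by_cases h1 : x = '='
  · subst h1; decide
  · by_cases h2 : x = '+'
    · subst h2; decide
    · by_cases h3 : x ∈ pvPunct <;> simp [h1, h2, h3, pvExpand]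

theorem pv_chain_eq_flatMap (s : String) :
    (pvPunctStrs.foldl (fun t ch => PySem.Str.replace t ch " ")
        (PySem.Str.replace (PySem.Str.replace s "=" " = ") "+" " + ")).toList
      = s.toList.flatMap pvExpand := by
  rw [pv_strfoldl_to_chars, PySem.Str.toList_replace, PySem.Str.toList_replace]
  have hmap : pvPunctStrs.map String.toList = pvPunct.map (fun c => [c]) := by decide
  rw [hmap, List.foldl_map]
  have h1 : ("=" : String).toList = ['='] := by decide
  have h2 : (" = " : String).toList = [' ', '=', ' '] := by decide
  have h3 : ("+" : String).toList = ['+'] := by decide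
  have h4 : (" + " : String).toList = [' ', '+', ' '] := by decide
  rw [h1, h2, h3, h4, pv_replace_single, pv_replace_single,
    pv_foldl_replace_chars pvPunct (by decide), List.flatMap_assoc, List.flatMap_assoc]
  exact List.flatMap_congr (fun x _ => pv_expand_pointwise x)

-- B's loop produces exactly the nonempty pieces of the split of the expanded string
theorem pv_tokens_eq (cs : List Char) :
    ∀ (toks : List (List Char)) (cur : List Char), ' ' ∉ cur →
      pvTokens cs toks cur
        = toks ++ (pvSplitC ' ' (cur.reverse ++ cs.flatMap pvExpand)).filter (fun x => x ≠ []) := by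
  induction cs with
  | nil =>
    intro toks cur h
    have hns : ' ' ∉ cur.reverse := by simpa using h
    simp only [pvTokens, List.flatMap_nil, List.append_nil, pv_splitC_not_mem hns]
    by_cases hc : cur = [] <;> simp [pvFlush, hc]
  | cons c rest ih =>
    intro toks cur h
    have hns : ' ' ∉ cur.reverse := by simpa using h
    by_cases hsp : c = ' '
    · subst hsp
      have he : pvExpand ' ' = [' '] := by decide
      simp only [pvTokens, List.flatMap_cons, he, List.singleton_append,
        pv_splitC_append _ hns, ih _ [] (by simp), List.filter_cons]
      by_cases hc : cur = [] <;> simp [pvFlush, hc, List.append_assoc]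
    · by_cases heq : c = '=' ∨ c = '+'
      · have he : pvExpand c = [' ', c, ' '] := by
          rcases heq with h' | h' <;> subst h' <;> decide
        have hone : ' ' ∉ [c] := by
          rcases heq with h' | h' <;> subst h' <;> decide
        simp only [pvTokens, hsp, ite_false, if_pos heq, List.flatMap_cons, he,
          ih _ [] (by simp)]
        have : cur.reverse ++ ([' ', c, ' '] ++ List.flatMap pvExpand rest)
            = cur.reverse ++ ' ' :: ([c] ++ ' ' :: List.flatMap pvExpand rest) := by simp
        rw [this, pv_splitC_append _ hns, pv_splitC_append _ hone, List.filter_cons,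
          List.filter_cons]
        by_cases hc : cur = [] <;> simp [pvFlush, hc, List.append_assoc]
      · by_cases hpu : c ∈ pvPunct
        · have he : pvExpand c = [' '] := by
            have hne : c ≠ '=' := fun hh => heq (Or.inl hh)
            have hnp : c ≠ '+' := fun hh => heq (Or.inr hh)
            simp [pvExpand, hne, hnp, hpu]
          simp only [pvTokens, hsp, ite_false, heq, if_pos hpu, List.flatMap_cons, he,
            List.singleton_append, pv_splitC_append _ hns, ih _ [] (by simp), List.filter_cons]
          by_cases hc : cur = [] <;> simp [pvFlush, hc, List.append_assoc]
        · have he : pvExpand c = [c] := by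
            have hne : c ≠ '=' := fun hh => heq (Or.inl hh)
            have hnp : c ≠ '+' := fun hh => heq (Or.inr hh)
            simp [pvExpand, hne, hnp, hpu]
          have hcur : ' ' ∉ c :: cur := by
            intro hm; rcases List.mem_cons.mp hm with h' | h'
            · exact hsp h'.symm
            · exact h h'
          simp only [pvTokens, hsp, ite_false, heq, hpu, List.flatMap_cons, he,
            List.singleton_append, ih _ _ hcur]
          simp [List.append_assoc]

theorem pv_filter_map (ps : List String) :
    (ps.filter (fun x => x ≠ "")).map String.toList
      = (ps.map String.toList).filter (fun l => l ≠ []) := by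
  induction ps with
  | nil => rfl
  | cons p ps ihp =>
    by_cases hp : p = ""
    · subst hp; simpa using ihp
    · have hpl : p.toList ≠ [] := fun hh => hp (String.toList_eq_nil_iff.mp hh)
      simp only [List.filter_cons, List.map_cons]
      simp only [hp, hpl, decide_not]
      simp
      simpa using ihp

set_option maxRecDepth 4096 in
theorem pv_main (text : String) :
    normalize_user_text_v91 text = normalize_user_text_v91_alt text := by
  unfold normalize_user_text_v91 normalize_user_text_v91_alt pv_strip_accents
  apply String.toList_inj.mp
  rw [PySem.Str.toList_strip, String.toList_ofList]
  refine congrArg PySem.Chars.strip ?_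
  rw [PySem.Str.toList_join]
  have hsep : (" " : String).toList = [' '] := by decide
  rw [hsep]
  refine congrArg (PySem.Chars.join [' ']) ?_
  -- identify the split parts
  have hs3 := pv_chain_eq_flatMap (PySem.Str.lower text)
  have hsplit : PySem.Chars.split? (pvPunctStrs.foldl (fun t ch => PySem.Str.replace t ch " ")
      (PySem.Str.replace (PySem.Str.replace (PySem.Str.lower text) "=" " = ") "+" " + ")).toList
      (" " : String).toList
      = some (pvSplitC ' ' ((PySem.Str.lower text).toList.flatMap pvExpand)) := by
    rw [hsep, PySem.Chars.split?, if_neg (by simp), hs3, pv_splitOn_single]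
  rcases hps : PySem.Str.split? (pvPunctStrs.foldl (fun t ch => PySem.Str.replace t ch " ")
      (PySem.Str.replace (PySem.Str.replace (PySem.Str.lower text) "=" " = ") "+" " + ")) " "
      with _ | ps
  · exfalso
    have := PySem.Str.split?_map (pvPunctStrs.foldl (fun t ch => PySem.Str.replace t ch " ")
      (PySem.Str.replace (PySem.Str.replace (PySem.Str.lower text) "=" " = ") "+" " + ")) " "
    rw [hps, hsplit] at this
    simp at this
  · have hmap : ps.map String.toList = pvSplitC ' ' ((PySem.Str.lower text).toList.flatMap pvExpand) := by
      have := PySem.Str.split?_map (pvPunctStrs.foldl (fun t ch => PySem.Str.replace t ch " ")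
        (PySem.Str.replace (PySem.Str.replace (PySem.Str.lower text) "=" " = ") "+" " + ")) " "
      rw [hps, hsplit] at this
      simpa using this
    rw [pv_tokens_eq _ [] [] (by simp)]
    simp only [Option.getD_some, List.nil_append, List.reverse_nil]
    rw [pv_filter_map, hmap]
-- ===== VERDICT (by name: the statement is the Claim_ definition above) =====
theorem normalize_user_text_v91_spec : Claim_equal_normalize_user_text_v91 := by
  intro text _
  exact pv_main text
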